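-- pv_equiv track=rewrite | github.com/AbuDaher/Scoalainformala | 00-Tema/Tema-13-02-2022.py | suma_i
-- ===== SOURCE A (Python) =====
-- def suma_i(n):
--     if n == 0:
--         return 0
--     if n == 1:
--         return 1
--     if n == 2:
--         return 1
--     if n % 2 != 0:
--         return n + suma_i(n - 2)
--     else:
--         return n - 1 + suma_i(n - 2)
-- ===== SOURCE B (Python) =====
-- def suma_i(n):
--     # closed form: the recursion sums the odd numbers 1,3,...  giving ((n+1)//2)**2
--     return ((n + 1) // 2) ** 2
-- ===== Notes on version B (the rewrite author's own statement) =====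
-- stated objective: faster
-- what changed: Replaces the step-by-2 recursion with the closed form ((n+1)//2)**2.
import Mathlib
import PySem

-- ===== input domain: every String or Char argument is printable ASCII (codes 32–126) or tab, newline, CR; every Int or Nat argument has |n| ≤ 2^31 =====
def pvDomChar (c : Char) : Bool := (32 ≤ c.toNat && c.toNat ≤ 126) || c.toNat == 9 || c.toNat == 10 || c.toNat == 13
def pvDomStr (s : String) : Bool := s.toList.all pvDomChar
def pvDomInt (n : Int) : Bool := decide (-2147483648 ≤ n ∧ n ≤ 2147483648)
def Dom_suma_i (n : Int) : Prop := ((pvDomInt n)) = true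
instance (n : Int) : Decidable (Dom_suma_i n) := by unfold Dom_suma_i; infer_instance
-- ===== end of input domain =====

-- B replaces A's step-by-2 recursion with the closed form ((n+1)//2)**2 (O(1) vs O(n)).


-- ===== PORT A =====
-- Literal port of A; the 'n < 0' guard only makes the recursion total (Python diverges
-- there, excluded by Pre_suma_i).
def suma_i (n : Int) : Int :=
  if n = 0 then 0
  else if n = 1 then 1
  else if n = 2 then 1
  else if n < 0 then 0
  else if PySem.Int.mod n 2 ≠ 0 then n + suma_i (n - 2)
  else n - 1 + suma_i (n - 2)
termination_by n.toNat
decreasing_by all_goals omega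

-- ===== PORT B =====
def suma_i_alt (n : Int) : Int := (PySem.Int.floordiv (n + 1) 2) ^ 2

-- ===== PRECONDITION & SPEC =====
-- Pre_ excludes n < 0, where A recurses forever (RecursionError).
def Pre_suma_i (n : Int) : Prop := 0 ≤ n
instance (n : Int) : Decidable (Pre_suma_i n) := by unfold Pre_suma_i; infer_instance
def pvWitness_suma_i : Int := 7
def Spec_suma_i (n : Int) (out : Int) : Prop := out = suma_i_alt n
instance (n : Int) (out : Int) : Decidable (Spec_suma_i n out) := by unfold Spec_suma_i; infer_instance

-- ===== CLAIM (what is proved, stated in full; the proofs are below) =====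
def Claim_equal_suma_i : Prop := ∀ (n : Int), Dom_suma_i n → Pre_suma_i n → Spec_suma_i n (suma_i n)

-- ===== LEMMAS AND PROOFS =====
lemma suma_i_alt_nonneg (n : Int) (hn : 0 ≤ n) :
    suma_i_alt n = ((n + 1) / 2) ^ 2 := by
  unfold suma_i_alt
  rw [PySem.Int.floordiv_eq_ediv_of_pos (by omega)]

lemma suma_i_closed : ∀ (m : Nat), suma_i (m : Int) = (((m : Int) + 1) / 2) ^ 2 := by
  intro m
  induction m using Nat.strong_induction_on with
  | _ m ih =>
    rcases Nat.lt_or_ge m 3 with h3 | h3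
    · interval_cases m <;> (rw [suma_i]; norm_num)
    · have ih' := ih (m - 2) (by omega)
      have hcast : ((m - 2 : Nat) : Int) = (m : Int) - 2 := by push_cast; omega
      rw [hcast] at ih'
      unfold suma_i
      have h0 : ¬ ((m : Int) = 0) := by omega
      have h1 : ¬ ((m : Int) = 1) := by omega
      have h2 : ¬ ((m : Int) = 2) := by omega
      have hneg : ¬ ((m : Int) < 0) := by omega
      rw [if_neg h0, if_neg h1, if_neg h2, if_neg hneg]
      have hmod : PySem.Int.mod (m : Int) 2 = (m : Int) % 2 := by
        rw [PySem.Int.mod_eq_emod_of_pos (by omega)]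
      by_cases hodd : (m : Int) % 2 = 1
      · rw [if_pos (by rw [hmod]; omega), ih']
        obtain ⟨k, hk⟩ : ∃ k : Int, (m : Int) = 2 * k + 1 := ⟨(m : Int) / 2, by omega⟩
        have hk1 : ((m : Int) + 1) / 2 = k + 1 := by omega
        have hk2 : ((m : Int) - 2 + 1) / 2 = k := by omega
        rw [hk1, hk2, hk]; ring
      · rw [if_neg (by rw [hmod]; omega), ih']
        obtain ⟨k, hk⟩ : ∃ k : Int, (m : Int) = 2 * k := ⟨(m : Int) / 2, by omega⟩
        have hk1 : ((m : Int) + 1) / 2 = k := by omega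
        have hk2 : ((m : Int) - 2 + 1) / 2 = k - 1 := by omega
        rw [hk1, hk2, hk]; ring

-- ===== VERDICT (by name: the statement is the Claim_ definition above) =====
theorem suma_i_spec : Claim_equal_suma_i := by
  intro n _ hpre
  unfold Pre_suma_i at hpre
  unfold Spec_suma_i
  obtain ⟨m, rfl⟩ : ∃ m : Nat, n = (m : Int) := ⟨n.toNat, by omega⟩
  rw [suma_i_closed m, suma_i_alt_nonneg _ (by omega)]
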